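-- pv_equiv track=rewrite | github.com/MrBrantCode/unitest_baseline | mut_generate/mist_train_cf/cf_37191/solution.py | apply_logic_gate
-- ===== SOURCE A (Python) =====
-- def apply_logic_gate(op, height, width):
--     def apply_gate(x, y):
--         if op == "And":
--             return x and y
--         elif op == "NAnd":
--             return not (x and y)
--         elif op == "Or":
--             return x or y
--         elif op == "NOr":
--             return not (x or y)
--         elif op == "XOr":
--             return x != y
--         elif op == "NXOr":
--             return not (x != y)
--
--     grid = [[apply_gate(bool(i % 2), bool(j % 2)) for j in range(width)] for i in range(height)]
--     return grid
-- ===== SOURCE B (Python) =====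
-- def apply_logic_gate(op, height, width):
--     def gate(x, y):
--         if op == "And":
--             return x and y
--         elif op == "NAnd":
--             return not (x and y)
--         elif op == "Or":
--             return x or y
--         elif op == "NOr":
--             return not (x or y)
--         elif op == "XOr":
--             return x != y
--         elif op == "NXOr":
--             return not (x != y)
--
--     if height <= 0:
--         return []
--     # 2x2 truth table for the parity inputs, computed once
--     t00, t01 = gate(False, False), gate(False, True)
--     t10, t11 = gate(True, False), gate(True, True)
--     # the two row templates, built by pair replication + truncation
--     even_row = ([t00, t01] * ((width + 1) // 2))[:width]
--     odd_row = ([t10, t11] * ((width + 1) // 2))[:width]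
--     grid = []
--     for i in range(height):
--         grid.append(list(even_row if i % 2 == 0 else odd_row))
--     return grid
-- ===== Notes on version B (the rewrite author's own statement) =====
-- stated objective: faster
-- what changed: B evaluates the gate only four times to build a 2x2 parity truth table, constructs the two row templates by pair replication + truncation, and fills the grid by copying the right template per row parity, instead of A's per-cell gate evaluation (string comparisons + function call per cell) inside a nested comprehension.
-- outside the precondition, e.g. on apply_logic_gate('Foo', 1, 1): A returns [[None]], B returns [[None]]
import Mathlib
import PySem

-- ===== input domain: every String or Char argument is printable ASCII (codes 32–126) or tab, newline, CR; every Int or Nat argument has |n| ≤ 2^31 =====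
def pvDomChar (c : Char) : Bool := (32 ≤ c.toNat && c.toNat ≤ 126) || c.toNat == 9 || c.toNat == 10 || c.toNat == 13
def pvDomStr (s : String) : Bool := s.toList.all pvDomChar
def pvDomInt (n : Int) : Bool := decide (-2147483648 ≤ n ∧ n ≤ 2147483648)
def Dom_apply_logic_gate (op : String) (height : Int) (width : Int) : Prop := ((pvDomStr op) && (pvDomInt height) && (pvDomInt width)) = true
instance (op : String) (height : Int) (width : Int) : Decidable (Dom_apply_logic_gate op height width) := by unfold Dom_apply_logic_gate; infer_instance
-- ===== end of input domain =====

-- B replaces A's per-cell gate evaluation by a 2x2 parity truth table plus row-template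
-- replication (objective: simpler). Equivalence is about the return value.

-- ===== PORT A =====
-- A's inner helper apply_gate; 'none' = Python returns None (no matching op).
def pvGateA (op : String) (x y : Bool) : Option Bool :=
  if op == "And" then some (x && y)
  else if op == "NAnd" then some (!(x && y))
  else if op == "Or" then some (x || y)
  else if op == "NOr" then some (!(x || y))
  else if op == "XOr" then some (x != y)
  else if op == "NXOr" then some (!(x != y))
  else none

-- nested comprehension; '.getD false' is only reachable for ops outside Pre_ (Python holds None there)
def apply_logic_gate (op : String) (height : Int) (width : Int) : List (List Bool) :=
  (PySem.List.pyRange 0 height 1).map (fun i =>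
    (PySem.List.pyRange 0 width 1).map (fun j =>
      (pvGateA op (i % 2 != 0) (j % 2 != 0)).getD false))

-- ===== PORT B =====
-- Source B's inner helper gate (same branching as A's helper, evaluated only four times)
def pvGateB (op : String) (x y : Bool) : Option Bool :=
  if op == "And" then some (x && y)
  else if op == "NAnd" then some (!(x && y))
  else if op == "Or" then some (x || y)
  else if op == "NOr" then some (!(x || y))
  else if op == "XOr" then some (x != y)
  else if op == "NXOr" then some (!(x != y))
  else none

-- [t0,t1] * ((width+1)//2) then [:width]; grid loop appends a copy of the template per row parity
-- ('.getD false' only reachable outside Pre_; Python's list(...) copy has no Lean counterpart)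
def apply_logic_gate_alt (op : String) (height : Int) (width : Int) : List (List Bool) :=
  if height ≤ 0 then [] else
  let t00 := (pvGateB op false false).getD false
  let t01 := (pvGateB op false true).getD false
  let t10 := (pvGateB op true false).getD false
  let t11 := (pvGateB op true true).getD false
  let evenRow := PySem.List.slice ((List.replicate ((PySem.Int.floordiv (width + 1) 2).toNat) [t00, t01]).flatten) none (some width)
  let oddRow := PySem.List.slice ((List.replicate ((PySem.Int.floordiv (width + 1) 2).toNat) [t10, t11]).flatten) none (some width)
  (PySem.List.pyRange 0 height 1).map (fun i => if i % 2 == 0 then evenRow else oddRow)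

-- ===== PRECONDITION & SPEC =====
-- Pre_ excludes inputs with an unrecognised gate name and a non-empty grid: there A's (and B's)
-- grid holds None, which is not a value of the declared Bool cell type.
def Pre_apply_logic_gate (op : String) (height : Int) (width : Int) : Prop :=
  op = "And" ∨ op = "NAnd" ∨ op = "Or" ∨ op = "NOr" ∨ op = "XOr" ∨ op = "NXOr" ∨ height ≤ 0 ∨ width ≤ 0
instance (op : String) (height : Int) (width : Int) : Decidable (Pre_apply_logic_gate op height width) := by unfold Pre_apply_logic_gate; infer_instance
def pvWitness_apply_logic_gate : String × Int × Int := ("XOr", 3, 4)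

def Spec_apply_logic_gate (op : String) (height : Int) (width : Int) (out : List (List Bool)) : Prop := out = apply_logic_gate_alt op height width
instance (op : String) (height : Int) (width : Int) (out : List (List Bool)) : Decidable (Spec_apply_logic_gate op height width out) := by unfold Spec_apply_logic_gate; infer_instance

-- ===== CLAIM (what is proved, stated in full; the proofs are below) =====
def Claim_equal_apply_logic_gate : Prop := ∀ (op : String) (height : Int) (width : Int), Dom_apply_logic_gate op height width → Pre_apply_logic_gate op height width → Spec_apply_logic_gate op height width (apply_logic_gate op height width)

-- ===== LEMMAS AND PROOFS =====

-- abstract alternating list a,b,a,b,… of length n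
def pvAlt {α : Type} (a b : α) : Nat → List α
  | 0 => []
  | n+1 => a :: pvAlt b a n

theorem pvAlt_range {α : Type} : ∀ (n : Nat) (a b : α),
    (List.range n).map (fun k => if k % 2 = 0 then a else b) = pvAlt a b n := by
  intro n
  induction n with
  | zero => intro a b; simp [pvAlt]
  | succ n ih =>
    intro a b
    rw [List.range_succ_eq_map, List.map_cons, List.map_map]
    simp only [pvAlt]
    refine congrArg (a :: ·) ?_
    rw [← ih b a]
    apply List.map_congr_left
    intro k _
    have h1 : (k + 1) % 2 = 0 ↔ ¬ (k % 2 = 0) := by omega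
    by_cases h : k % 2 = 0 <;> simp [Nat.succ_eq_add_one, h1, h]

theorem pvAlt_replicate {α : Type} : ∀ (n : Nat) (a b : α),
    ((List.replicate ((n+1)/2) [a, b]).flatten).take n = pvAlt a b n
  | 0, a, b => by simp [pvAlt]
  | 1, a, b => by simp [pvAlt]
  | (n+2), a, b => by
    have ih := pvAlt_replicate n a b
    have h : (n+2+1)/2 = (n+1)/2 + 1 := by omega
    rw [h, List.replicate_succ]
    simpa [pvAlt] using ih

-- a row of A (with cell values c0 for even columns, c1 for odd) is B's template
theorem pvRowEq {α : Type} (w : Int) (c0 c1 : α) :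
    (PySem.List.pyRange 0 w 1).map (fun j => if j % 2 = 0 then c0 else c1)
      = PySem.List.slice ((List.replicate ((PySem.Int.floordiv (w + 1) 2).toNat) [c0, c1]).flatten) none (some w) := by
  by_cases hw : 0 ≤ w
  · rw [PySem.List.slice_to _ hw, PySem.List.pyRange_one, List.map_map]
    have hfd : (PySem.Int.floordiv (w + 1) 2).toNat = (w.toNat + 1) / 2 := by
      rw [PySem.Int.floordiv_eq_ediv_of_pos (by omega : (0:Int) < 2)]
      omega
    rw [hfd, pvAlt_replicate]
    rw [← pvAlt_range w.toNat c0 c1]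
    simp only [sub_zero]
    apply List.map_congr_left
    intro k _
    by_cases h : k % 2 = 0
    · simp [h]
      intro hk
      exact absurd hk (by omega)
    · simp [h]
      intro hk
      exact absurd hk (by omega)
  · have h1 : PySem.List.pyRange 0 w 1 = [] := PySem.List.pyRange_one_eq_nil (by omega)
    have h2 : (PySem.Int.floordiv (w + 1) 2).toNat = 0 := by
      rw [PySem.Int.floordiv_eq_ediv_of_pos (by omega : (0:Int) < 2)]
      omega
    rw [h1, h2]
    simp [PySem.List.slice]

-- ===== VERDICT (by name: the statement is the Claim_ definition above) =====
theorem apply_logic_gate_spec : Claim_equal_apply_logic_gate := by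
  intro op h w _ _
  unfold Spec_apply_logic_gate apply_logic_gate apply_logic_gate_alt
  by_cases hh : h ≤ 0
  · rw [if_pos hh, show PySem.List.pyRange 0 h 1 = [] from PySem.List.pyRange_one_eq_nil hh, List.map_nil]
  rw [if_neg hh]
  apply List.map_congr_left
  intro i _
  by_cases hi : i % 2 = 0
  · have : (i % 2 == 0) = true := by simp [hi]
    rw [this, if_pos rfl, ← pvRowEq]
    apply List.map_congr_left
    intro j _
    have hx : (i % 2 != 0) = false := by simp [hi]
    by_cases hj : j % 2 = 0
    · simp [pvGateA, pvGateB, hx, hj]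
    · have hjb : (j % 2 != 0) = true := by simp [hj]
      simp [pvGateA, pvGateB, hx, hjb, hj]
  · have : (i % 2 == 0) = false := by simp [hi]
    rw [this]
    simp only [Bool.false_eq_true, if_false]
    rw [← pvRowEq]
    apply List.map_congr_left
    intro j _
    have hx : (i % 2 != 0) = true := by simp [hi]
    by_cases hj : j % 2 = 0
    · simp [pvGateA, pvGateB, hx, hj]
    · have hjb : (j % 2 != 0) = true := by simp [hj]
      simp [pvGateA, pvGateB, hx, hjb, hj]
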